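-- pv_equiv track=rewrite | github.com/NavchetanKaur/local_tool | transplanttoolbox/ancillary_funcs.py | group_list_of_alleles_per_locus
-- ===== SOURCE A (Python) =====
-- def group_list_of_alleles_per_locus(donor_typing_list):
-- 	donor_a_alleles = []
-- 	donor_b_alleles = []
-- 	donor_c_alleles = []
-- 	donor_dr_alleles = []
-- 	donor_dq_alleles = []
--
--
-- 	for i in donor_typing_list:
-- 		locus = i.split("*")[0]
-- 		if locus == "A":
-- 			donor_a_alleles.append(i)
--
-- 		if locus == "B":
-- 			donor_b_alleles.append(i)
--
-- 		if locus == "C":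
-- 			donor_c_alleles.append(i)
--
-- 		if (locus == "DRB1") or (locus == "DRB3") or (locus == "DRB4") or (locus == "DRB5"):
-- 			donor_dr_alleles.append(i)
--
-- 		if (locus == "DQB1") or (locus == "DQA1"):
-- 			donor_dq_alleles.append(i)
--
--
-- 	final_typing_list = [", ".join(sorted(donor_a_alleles))] + [", ".join(sorted(donor_b_alleles))] + [""] + [", ".join(sorted(donor_c_alleles))] + [", ".join(sorted(donor_dr_alleles))] + [", ".join(sorted(donor_dq_alleles))]
--
-- 	return final_typing_list
-- ===== SOURCE B (Python) =====
-- def group_list_of_alleles_per_locus(donor_typing_list):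
--     def grp(loci):
--         return ", ".join(sorted(i for i in donor_typing_list
--                                 if i.split("*")[0] in loci))
--     return [grp(("A",)), grp(("B",)), "", grp(("C",)),
--             grp(("DRB1", "DRB3", "DRB4", "DRB5")),
--             grp(("DQB1", "DQA1"))]
-- ===== Notes on version B (the rewrite author's own statement) =====
-- stated objective: simpler
-- what changed: Replaces the single bucketing pass with five mutable accumulator lists by one filter-sort-join pass per locus group driven by a table of locus sets, assembled directly into the output list.
import Mathlib
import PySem

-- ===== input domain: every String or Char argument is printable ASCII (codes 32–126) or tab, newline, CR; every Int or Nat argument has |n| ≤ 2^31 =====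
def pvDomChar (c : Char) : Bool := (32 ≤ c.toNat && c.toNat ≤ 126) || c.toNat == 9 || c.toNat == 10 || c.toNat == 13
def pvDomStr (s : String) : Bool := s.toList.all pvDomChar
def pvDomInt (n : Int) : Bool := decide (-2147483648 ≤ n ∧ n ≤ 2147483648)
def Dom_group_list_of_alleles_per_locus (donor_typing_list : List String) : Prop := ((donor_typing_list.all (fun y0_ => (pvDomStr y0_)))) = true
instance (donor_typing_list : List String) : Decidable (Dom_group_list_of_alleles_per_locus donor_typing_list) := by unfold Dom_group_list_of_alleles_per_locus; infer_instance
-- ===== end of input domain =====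

-- B replaces A's five-accumulator bucketing pass by a table-driven filter/sort/join per locus group (objective: simpler).

-- ===== PORT A =====
-- i.split("*")[0]: splitOn never returns [], so the [] arm is unreachable
def pvLocus (i : String) : String :=
  match PySem.Str.split? i "*" with
  | some (x :: _) => x
  | _ => ""

def group_list_of_alleles_per_locus (donor_typing_list : List String) : List String :=
  let st := donor_typing_list.foldl
    (fun (st : List String × List String × List String × List String × List String) i =>
      let (a, b, c, dr, dq) := st
      let locus := pvLocus i
      let a := if locus == "A" then a ++ [i] else a
      let b := if locus == "B" then b ++ [i] else b
      let c := if locus == "C" then c ++ [i] else c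
      let dr := if locus == "DRB1" || locus == "DRB3" || locus == "DRB4" || locus == "DRB5" then dr ++ [i] else dr
      let dq := if locus == "DQB1" || locus == "DQA1" then dq ++ [i] else dq
      (a, b, c, dr, dq))
    ([], [], [], [], [])
  let (a, b, c, dr, dq) := st
  [PySem.Str.join ", " (PySem.List.sorted a (fun x => x) false)] ++
  [PySem.Str.join ", " (PySem.List.sorted b (fun x => x) false)] ++
  [""] ++
  [PySem.Str.join ", " (PySem.List.sorted c (fun x => x) false)] ++
  [PySem.Str.join ", " (PySem.List.sorted dr (fun x => x) false)] ++
  [PySem.Str.join ", " (PySem.List.sorted dq (fun x => x) false)]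

-- ===== PORT B =====
def pvGrp (donor_typing_list : List String) (loci : List String) : String :=
  PySem.Str.join ", "
    (PySem.List.sorted
      (donor_typing_list.filter (fun i => loci.contains (pvLocus i)))
      (fun x => x) false)

def group_list_of_alleles_per_locus_alt (donor_typing_list : List String) : List String :=
  [pvGrp donor_typing_list ["A"],
   pvGrp donor_typing_list ["B"],
   "",
   pvGrp donor_typing_list ["C"],
   pvGrp donor_typing_list ["DRB1", "DRB3", "DRB4", "DRB5"],
   pvGrp donor_typing_list ["DQB1", "DQA1"]]

-- ===== PRECONDITION & SPEC =====
def Spec_group_list_of_alleles_per_locus (donor_typing_list : List String) (out : List String) : Prop := out = group_list_of_alleles_per_locus_alt donor_typing_list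
instance (donor_typing_list : List String) (out : List String) : Decidable (Spec_group_list_of_alleles_per_locus donor_typing_list out) := by unfold Spec_group_list_of_alleles_per_locus; infer_instance

-- ===== CLAIM (what is proved, stated in full; the proofs are below) =====
def Claim_equal_group_list_of_alleles_per_locus : Prop := ∀ (donor_typing_list : List String), Dom_group_list_of_alleles_per_locus donor_typing_list → Spec_group_list_of_alleles_per_locus donor_typing_list (group_list_of_alleles_per_locus donor_typing_list)

-- ===== LEMMAS AND PROOFS =====

-- A's fold with five accumulators is five independent filters
theorem pvFold_eq_filters (xs a b c dr dq : List String) :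
    xs.foldl
      (fun (st : List String × List String × List String × List String × List String) i =>
        let (a, b, c, dr, dq) := st
        let locus := pvLocus i
        let a := if locus == "A" then a ++ [i] else a
        let b := if locus == "B" then b ++ [i] else b
        let c := if locus == "C" then c ++ [i] else c
        let dr := if locus == "DRB1" || locus == "DRB3" || locus == "DRB4" || locus == "DRB5" then dr ++ [i] else dr
        let dq := if locus == "DQB1" || locus == "DQA1" then dq ++ [i] else dq
        (a, b, c, dr, dq))
      (a, b, c, dr, dq)
    = (a ++ xs.filter (fun i => pvLocus i == "A"),
       b ++ xs.filter (fun i => pvLocus i == "B"),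
       c ++ xs.filter (fun i => pvLocus i == "C"),
       dr ++ xs.filter (fun i => pvLocus i == "DRB1" || pvLocus i == "DRB3" || pvLocus i == "DRB4" || pvLocus i == "DRB5"),
       dq ++ xs.filter (fun i => pvLocus i == "DQB1" || pvLocus i == "DQA1")) := by
  induction xs generalizing a b c dr dq with
  | nil => simp
  | cons x xs ih =>
    simp only [List.foldl_cons, List.filter_cons]
    rw [ih]
    split_ifs <;> simp_all

theorem group_list_of_alleles_per_locus_eq_alt (xs : List String) :
    group_list_of_alleles_per_locus xs = group_list_of_alleles_per_locus_alt xs := by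
  unfold group_list_of_alleles_per_locus group_list_of_alleles_per_locus_alt pvGrp
  rw [pvFold_eq_filters]
  simp [Bool.or_assoc, beq_eq_decide]

-- ===== VERDICT (by name: the statement is the Claim_ definition above) =====
theorem group_list_of_alleles_per_locus_spec : Claim_equal_group_list_of_alleles_per_locus := by
  intro xs _
  exact group_list_of_alleles_per_locus_eq_alt xs
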